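-- pv_equiv track=rewrite | github.com/freddyvelarde/umsa-code | python/strings/f.py | vocalsRemainers
-- ===== SOURCE A (Python) =====
-- def vocalsRemainers(word):
--     vocals = 'aeiou'
--     res = ''
--     for char in word:
--         if char in vocals and char not in res:
--             res += char
--     for char in res:
--         vocals = vocals.replace(char, "")
--     return vocals
-- ===== SOURCE B (Python) =====
-- def vocalsRemainers(word):
--     return ''.join(v for v in 'aeiou' if v not in word)
-- ===== Notes on version B (the rewrite author's own statement) =====
-- stated objective: simpler
-- what changed: B iterates over the five-vowel alphabet and keeps each vowel absent from the word, instead of A's two passes that first accumulate the vowels present in the word and then delete them from the alphabet with repeated replace calls.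
import Mathlib
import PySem

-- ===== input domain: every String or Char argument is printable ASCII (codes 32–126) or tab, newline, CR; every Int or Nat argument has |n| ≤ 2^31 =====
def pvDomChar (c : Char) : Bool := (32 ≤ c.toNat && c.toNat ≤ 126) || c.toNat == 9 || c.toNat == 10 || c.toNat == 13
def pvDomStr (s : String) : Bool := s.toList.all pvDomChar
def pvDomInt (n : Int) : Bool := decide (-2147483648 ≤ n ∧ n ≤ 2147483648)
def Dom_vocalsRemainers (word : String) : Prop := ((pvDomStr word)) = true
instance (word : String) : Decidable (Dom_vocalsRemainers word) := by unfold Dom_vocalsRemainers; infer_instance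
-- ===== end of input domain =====

-- B replaces A's accumulate-then-delete two-pass scheme by a single filter over the
-- fixed vowel alphabet, keeping each vowel that does not occur in the word (objective: simpler).

-- ===== PORT A =====
-- literal transliteration: build res (present vowels, first-occurrence order), then
-- delete each char of res from 'aeiou' via str.replace
def vocalsRemainers (word : String) : String :=
  let vocals : String := "aeiou"
  let res : String := word.toList.foldl
    (fun res char =>
      if PySem.Str.isIn (String.ofList [char]) vocals && !(PySem.Str.isIn (String.ofList [char]) res)
      then res ++ String.ofList [char] else res) ""
  res.toList.foldl (fun vocals char => PySem.Str.replace vocals (String.ofList [char]) "") vocals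

-- ===== PORT B =====
-- literal transliteration of Source B: ''.join(v for v in 'aeiou' if v not in word)
def vocalsRemainers_alt (word : String) : String :=
  PySem.Str.join ""
    (("aeiou".toList.filter (fun v => !(PySem.Str.isIn (String.ofList [v]) word))).map
      (fun v => String.ofList [v]))

-- ===== PRECONDITION & SPEC =====
def Spec_vocalsRemainers (word : String) (out : String) : Prop := out = vocalsRemainers_alt word
instance (word : String) (out : String) : Decidable (Spec_vocalsRemainers word out) := by unfold Spec_vocalsRemainers; infer_instance

-- ===== CLAIM (what is proved, stated in full; the proofs are below) =====
def Claim_equal_vocalsRemainers : Prop := ∀ (word : String), Dom_vocalsRemainers word → Spec_vocalsRemainers word (vocalsRemainers word)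

-- ===== LEMMAS AND PROOFS =====

-- single-character `in`: 'c in s' ↔ c is a character of s
theorem isIn_single (c : Char) (l : List Char) :
    PySem.Chars.isIn [c] l = decide (c ∈ l) := by
  by_cases h : c ∈ l
  · simp only [h, decide_true]
    exact (PySem.Chars.isIn_iff_infix [c] l).mpr ((List.singleton_infix_iff c l).mpr h)
  · simp only [h, decide_false]
    exact (PySem.Chars.isIn_eq_false_iff [c] l).mpr (fun hc => h ((List.singleton_infix_iff c l).mp hc))

-- the list-level step of A's first loop
def stepL (r : List Char) (ch : Char) : List Char :=
  if ch ∈ "aeiou".toList ∧ ch ∉ r then r ++ [ch] else r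

-- A's first loop, seen through toList
theorem res_toList (W : List Char) (r : String) :
    (W.foldl
      (fun res char =>
        if PySem.Str.isIn (String.ofList [char]) "aeiou" && !(PySem.Str.isIn (String.ofList [char]) res)
        then res ++ String.ofList [char] else res) r).toList
    = W.foldl stepL r.toList := by
  induction W generalizing r with
  | nil => rfl
  | cons ch t ih =>
    simp only [List.foldl_cons]
    rw [ih]
    congr 1
    simp only [stepL]
    by_cases h1 : ch ∈ "aeiou".toList <;> by_cases h2 : ch ∈ r.toList <;>
      simp [isIn_single, h2] <;> split_ifs <;> simp_all

-- membership in A's accumulated res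
theorem mem_res_fold (W : List Char) (r : List Char) (c : Char) :
    c ∈ W.foldl stepL r ↔ c ∈ r ∨ (c ∈ "aeiou".toList ∧ c ∈ W) := by
  induction W generalizing r with
  | nil => simp
  | cons ch t ih =>
    simp only [List.foldl_cons, ih, stepL]
    split_ifs with h
    · constructor
      · rintro (h' | hm)
        · rcases List.mem_append.mp h' with h'' | h''
          · exact Or.inl h''
          · rcases List.mem_singleton.mp h'' with rfl
            exact Or.inr ⟨h.1, List.mem_cons_self ..⟩
        · exact Or.inr ⟨hm.1, List.mem_cons_of_mem _ hm.2⟩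
      · rintro (h' | ⟨hv, hw⟩)
        · exact Or.inl (List.mem_append_left _ h')
        · rcases List.mem_cons.mp hw with rfl | hw'
          · exact Or.inl (List.mem_append_right _ (List.mem_singleton.mpr rfl))
          · exact Or.inr ⟨hv, hw'⟩
    · constructor
      · rintro (h' | hm)
        · exact Or.inl h'
        · exact Or.inr ⟨hm.1, List.mem_cons_of_mem _ hm.2⟩
      · rintro (h' | ⟨hv, hw⟩)
        · exact Or.inl h'
        · rcases List.mem_cons.mp hw with rfl | hw'
          · exact Or.inl (not_not.mp (fun hr => h ⟨hv, hr⟩))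
          · exact Or.inr ⟨hv, hw'⟩

-- replace.go with a single-char pattern and empty replacement = filter
theorem replace_go_single (c : Char) (l acc : List Char) :
    PySem.Chars.replace.go [c] [] l.length l acc
      = acc.reverse ++ l.filter (fun x => !(x == c)) := by
  induction l generalizing acc with
  | nil => simp [PySem.Chars.replace.go]
  | cons c' t ih =>
    rw [List.length_cons, PySem.Chars.replace.go]
    by_cases h : c = c'
    · subst h
      simp [List.isPrefixOf, ih]
    · simp [List.isPrefixOf, Ne.symm h, h, ih]

-- replace with a single-char pattern and empty replacement = filter
theorem replace_single (cs : List Char) (c : Char) :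
    PySem.Chars.replace cs [c] [] = cs.filter (fun x => !(x == c)) := by
  rw [PySem.Chars.replace]
  simpa using replace_go_single c cs []

-- A's second loop, seen through toList
theorem del_toList (R : List Char) (v : String) :
    (R.foldl (fun vocals char => PySem.Str.replace vocals (String.ofList [char]) "") v).toList
    = R.foldl (fun vl ch => vl.filter (fun x => !(x == ch))) v.toList := by
  induction R generalizing v with
  | nil => rfl
  | cons ch t ih =>
    simp only [List.foldl_cons]
    rw [ih]
    congr 1
    rw [PySem.Str.toList_replace]
    simpa using replace_single v.toList ch

-- folding char-deletion over R filters out all of R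
theorem foldl_filter (R : List Char) (V : List Char) :
    R.foldl (fun vl ch => vl.filter (fun x => !(x == ch))) V
      = V.filter (fun x => decide (x ∉ R)) := by
  induction R generalizing V with
  | nil => simp
  | cons c t ih =>
    simp only [List.foldl_cons, ih, List.filter_filter]
    apply List.filter_congr
    intro x _
    by_cases h1 : x = c <;> by_cases h2 : x ∈ t <;> simp [h1, h2]

-- ===== VERDICT (by name: the statement is the Claim_ definition above) =====
theorem vocalsRemainers_spec : Claim_equal_vocalsRemainers := by
  intro word _
  unfold Spec_vocalsRemainers vocalsRemainers vocalsRemainers_alt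
  apply String.toList_injective
  rw [del_toList, res_toList, foldl_filter, PySem.Str.toList_join]
  have hmap : (("aeiou".toList.filter (fun v => !(PySem.Str.isIn (String.ofList [v]) word))).map
      (fun v => String.ofList [v])).map String.toList
      = ("aeiou".toList.filter (fun v => !(PySem.Str.isIn (String.ofList [v]) word))).map
          (fun v => [v]) := by
    simp
  rw [hmap, show ("" : String).toList = ([] : List Char) from rfl, PySem.Chars.join_nil_singletons]
  apply List.filter_congr
  intro x hx
  have hmem : x ∈ List.foldl stepL ([] : List Char) word.toList ↔ x ∈ word.toList := by
    rw [mem_res_fold]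
    constructor
    · rintro (h | h)
      · simp at h
      · exact h.2
    · intro h
      exact Or.inr ⟨hx, h⟩
  rw [show PySem.Str.isIn (String.ofList [x]) word = decide (x ∈ word.toList) by
    simpa using isIn_single x word.toList]
  by_cases h : x ∈ word.toList
  · simp [hmem.2 h, h]
  · have hn : x ∉ List.foldl stepL [] word.toList := fun hc => h (hmem.1 hc)
    simp [h, hn]
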